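-- pv_equiv track=rewrite | github.com/Sword-of-Stars/CS474 | phase2/chomsky_converter/main.py | transform_grammar
-- ===== SOURCE A (Python) =====
-- def transform_grammar(grammar):
--     """
--     Transforms grammar notation for LaTeX display.
--     Converts [Xy] to X_y format for subscripts.
--     """
--     transformed_grammar = {}
--
--     for variable, rules in grammar.items():
--         formatted_var = variable
--
--         transformed_rules = []
--
--         for rule in rules:
--             transformed_rule = ""
--             i = 0
--
--             while i < len(rule):
--                 if (i + 3 < len(rule) and
--                     rule[i] == '[' and
--                     rule[i+3] == ']'):
--                     transformed_rule += rule[i+1] + '_' + rule[i+2]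
--                     i += 4
--                 else:
--                     transformed_rule += rule[i]
--                     i += 1
--
--             transformed_rules.append(transformed_rule)
--
--         transformed_grammar[formatted_var] = transformed_rules
--
--     return transformed_grammar
-- ===== SOURCE B (Python) =====
-- import re
--
-- _BRACKET = re.compile(r'\[(.)(.)\]', flags=re.DOTALL)
--
-- def transform_grammar(grammar):
--     """
--     Transforms grammar notation for LaTeX display.
--     Converts [Xy] to X_y format for subscripts.
--     """
--     return {variable: [_BRACKET.sub(r'\1_\2', rule) for rule in rules]
--             for variable, rules in grammar.items()}
-- ===== Notes on version B (the rewrite author's own statement) =====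
-- stated objective: idiomatic
-- what changed: Replaced the hand-written index/while character scanner (with its i+=4/i+=1 bookkeeping and string concatenation) by a single precompiled regex substitution re.sub(r'\[(.)(.)\]', r'\1_\2', rule, flags=re.DOTALL) inside a dict comprehension.
import Mathlib
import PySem

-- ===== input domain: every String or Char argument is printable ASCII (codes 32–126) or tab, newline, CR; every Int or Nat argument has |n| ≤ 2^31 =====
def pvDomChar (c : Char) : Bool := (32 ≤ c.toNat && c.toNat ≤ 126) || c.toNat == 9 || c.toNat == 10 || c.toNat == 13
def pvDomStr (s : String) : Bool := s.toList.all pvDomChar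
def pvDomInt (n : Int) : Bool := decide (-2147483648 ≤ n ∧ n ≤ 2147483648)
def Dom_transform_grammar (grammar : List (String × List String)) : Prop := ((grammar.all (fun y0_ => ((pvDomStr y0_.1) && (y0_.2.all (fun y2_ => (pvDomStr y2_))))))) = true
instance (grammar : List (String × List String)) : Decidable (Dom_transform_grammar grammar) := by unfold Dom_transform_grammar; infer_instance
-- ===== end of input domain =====

-- B replaces A's manual index/while character scanner with a single regex substitution
-- re.sub(r'\[(.)(.)\]', r'\1_\2', rule, DOTALL) per rule (idiomatic, not claimed faster).

-- ===== PORT A =====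
-- A's inner while loop over string indices; the string is handled as its character
-- list (exact: rule[i] = toList[i], len = toList.length) and the '+=' accumulation
-- builds the character list of the result.
def tgLoopA (s : List Char) (i : Nat) (acc : List Char) : List Char :=
  if _h : i < s.length then
    if i + 3 < s.length ∧ s.getD i ' ' = '[' ∧ s.getD (i + 3) ' ' = ']' then
      tgLoopA s (i + 4) (acc ++ [s.getD (i + 1) ' ', '_', s.getD (i + 2) ' '])
    else
      tgLoopA s (i + 1) (acc ++ [s.getD i ' '])
  else acc
termination_by s.length - i

def transform_grammar (grammar : List (String × List String)) : List (String × List String) :=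
  (grammar.foldl
    (fun d vr =>
      PySem.Dict.insert d vr.1
        (vr.2.foldl (fun rs rule => rs ++ [String.ofList (tgLoopA rule.toList 0 [])]) []))
    PySem.Dict.empty).items

-- ===== PORT B =====
-- Hand port of re.sub(r'\[(.)(.)\]', r'\1_\2', rule, flags=re.DOTALL): the regex
-- engine scans left to right, replacing each leftmost non-overlapping 4-character
-- match [xy] (any two characters, DOTALL) by x_y, otherwise copying one character
-- and moving on — exact for this pattern.
def tgSubB : List Char → List Char
  | c0 :: c1 :: c2 :: c3 :: rest =>
      if c0 = '[' ∧ c3 = ']' then c1 :: '_' :: c2 :: tgSubB rest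
      else c0 :: tgSubB (c1 :: c2 :: c3 :: rest)
  | c :: rest => c :: tgSubB rest
  | [] => []

-- dict comprehension over grammar.items()
def transform_grammar_alt (grammar : List (String × List String)) : List (String × List String) :=
  (grammar.foldl
    (fun d vr =>
      PySem.Dict.insert d vr.1 (vr.2.map (fun rule => String.ofList (tgSubB rule.toList))))
    PySem.Dict.empty).items

-- ===== PRECONDITION & SPEC =====
def Spec_transform_grammar (grammar : List (String × List String)) (out : List (String × List String)) : Prop := out = transform_grammar_alt grammar
instance (grammar : List (String × List String)) (out : List (String × List String)) : Decidable (Spec_transform_grammar grammar out) := by unfold Spec_transform_grammar; infer_instance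

-- ===== CLAIM (what is proved, stated in full; the proofs are below) =====
def Claim_equal_transform_grammar : Prop := ∀ (grammar : List (String × List String)), Dom_transform_grammar grammar → Spec_transform_grammar grammar (transform_grammar grammar)

-- ===== LEMMAS AND PROOFS =====

theorem tg_getD (s : List Char) (i : Nat) (h : i < s.length) : s.getD i ' ' = s[i] := by
  simp [List.getD_eq_getElem?_getD, List.getElem?_eq_getElem h]

theorem tgLoopA_eq (s : List Char) (i : Nat) (acc : List Char) :
    tgLoopA s i acc = acc ++ tgSubB (s.drop i) := by
  fun_induction tgLoopA s i acc with
  | case1 i acc h hc ih =>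
      obtain ⟨h3, hb, he⟩ := hc
      have h0 : i < s.length := by omega
      have h1 : i + 1 < s.length := by omega
      have h2 : i + 2 < s.length := by omega
      rw [tg_getD _ _ h0] at hb
      rw [tg_getD _ _ h3] at he
      have e : List.drop i s = '[' :: s[i+1] :: s[i+2] :: ']' :: List.drop (i+4) s := by
        rw [List.drop_eq_getElem_cons h0, List.drop_eq_getElem_cons h1,
            List.drop_eq_getElem_cons h2, List.drop_eq_getElem_cons h3, hb, he]
      rw [ih, tg_getD _ _ h1, tg_getD _ _ h2, e]
      simp [tgSubB]
  | case2 i acc h hc ih =>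
      rw [ih, List.drop_eq_getElem_cons h, tg_getD _ _ h]
      by_cases h3 : i + 3 < s.length
      · have h1 : i + 1 < s.length := by omega
        have h2 : i + 2 < s.length := by omega
        rw [tg_getD _ _ h, tg_getD _ _ h3] at hc
        have hne : ¬ (s[i] = '[' ∧ s[i+3] = ']') := fun hp => hc ⟨h3, hp.1, hp.2⟩
        have e : List.drop (i+1) s = s[i+1] :: s[i+2] :: s[i+3] :: List.drop (i+4) s := by
          rw [List.drop_eq_getElem_cons h1, List.drop_eq_getElem_cons h2,
              List.drop_eq_getElem_cons h3]
        rw [e]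
        simp only [tgSubB, if_neg hne]
        simp
      · rcases e : List.drop (i+1) s with _ | ⟨x, _ | ⟨y, _ | ⟨z, w⟩⟩⟩
        · simp [tgSubB]
        · simp [tgSubB]
        · simp [tgSubB]
        · have := congrArg List.length e
          simp [List.length_drop] at this
          omega
  | case3 i acc h =>
      rw [List.drop_eq_nil_of_le (by omega)]
      simp [tgSubB]

theorem tg_inner_eq (rule : List Char) : tgLoopA rule 0 [] = tgSubB rule := by
  simpa using tgLoopA_eq rule 0 []

-- ===== VERDICT (by name: the statement is the Claim_ definition above) =====
theorem transform_grammar_spec : Claim_equal_transform_grammar := by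
  intro grammar _
  unfold Spec_transform_grammar transform_grammar transform_grammar_alt
  have hrules : ∀ (l : List String) (acc : List String),
      l.foldl (fun rs rule => rs ++ [String.ofList (tgLoopA rule.toList 0 [])]) acc
        = acc ++ l.map (fun rule => String.ofList (tgSubB rule.toList)) := by
    intro l
    induction l with
    | nil => simp
    | cons r t ih => intro acc; rw [List.foldl_cons, ih, tg_inner_eq]; simp [List.map_cons]
  congr 2
  funext d vr
  congr 1
  simpa using hrules vr.2 []
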